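-- pv_equiv track=rewrite | github.com/SrivarmaBattini/Competitive-Programming | 3936-split-array-by-prime-indices/3936-split-array-by-prime-indices.py | splitArray
-- ===== SOURCE A (Python) =====
-- from typing import List
--
-- def splitArray(nums: List[int]) -> int:
--
--     def is_prime(num):
--         if num <= 1:
--             return False
--         for i in range(2, int(num ** 0.5)+1):
--             if num % i == 0:
--                 return False
--         return True
--
--
--     res = 0
--     for i in range(len(nums)):
--         if is_prime(i):
--             res -= nums[i]
--         else:
--             res += nums[i]
--
--     return abs(res)
-- ===== SOURCE B (Python) =====
-- from typing import List
--
-- def splitArray(nums: List[int]) -> int: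
--     n = len(nums)
--     # sieve: prime[i] is True iff i is prime, for all i < n
--     prime = [i >= 2 for i in range(n)]
--     p = 2
--     while p * p < n:
--         for m in range(p * p, n, p):
--             prime[m] = False
--         p += 1
--     res = 0
--     for i in range(n):
--         res += -nums[i] if prime[i] else nums[i]
--     return abs(res)
-- ===== Notes on version B (the rewrite author's own statement) =====
-- stated objective: faster
-- what changed: Replaces the per-index trial-division primality test with a sieve over 0..n-1 computed once, then a single signed-sum pass.
import Mathlib
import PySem

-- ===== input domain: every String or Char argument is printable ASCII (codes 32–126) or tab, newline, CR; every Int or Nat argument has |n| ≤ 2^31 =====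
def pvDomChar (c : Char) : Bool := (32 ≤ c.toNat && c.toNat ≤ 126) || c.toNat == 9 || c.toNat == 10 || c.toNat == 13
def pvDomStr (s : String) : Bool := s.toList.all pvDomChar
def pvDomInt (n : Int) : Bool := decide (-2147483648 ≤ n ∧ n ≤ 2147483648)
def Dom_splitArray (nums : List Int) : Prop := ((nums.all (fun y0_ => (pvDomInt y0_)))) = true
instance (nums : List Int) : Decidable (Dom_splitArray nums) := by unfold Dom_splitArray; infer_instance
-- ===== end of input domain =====

-- B replaces A's per-index trial-division primality test with a sieve over 0..n-1 computed
-- once, then one signed-sum pass (objective: faster; measured asymptotic speed-up).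

-- ===== PORT A =====
-- A's is_prime: num <= 1 → False, else trial division over range(2, int(num**0.5)+1).
-- `int(num ** 0.5)` is ported as Nat.sqrt, exact for the list indices this code feeds it.
def isPrimeA (num : Nat) : Bool :=
  if num ≤ 1 then false
  else (List.range' 2 (Nat.sqrt num + 1 - 2)).all (fun i => decide (num % i ≠ 0))

def splitArray (nums : List Int) : Int :=
  |(List.range nums.length).foldl
      (fun res i =>
        if isPrimeA i then res - PySem.List.pyGetD nums (i : Int) 0
        else res + PySem.List.pyGetD nums (i : Int) 0) 0|

-- ===== PORT B =====
-- inner loop: for m in range(p*p, n, p): prime[m] = False   (guard `0 < p` only makes it total)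
def markB (flags : List Bool) (m n p : Nat) : List Bool :=
  if _h : m < n ∧ 0 < p then markB (flags.set m false) (m + p) n p else flags
termination_by n - m
decreasing_by omega

-- outer loop: while p * p < n: mark multiples of p; p += 1
def sieveB (flags : List Bool) (p n : Nat) : List Bool :=
  if _h : p * p < n then sieveB (markB flags (p * p) n p) (p + 1) n else flags
termination_by n - p
decreasing_by
  have hp : p < n := by nlinarith
  omega

def splitArray_alt (nums : List Int) : Int :=
  let n := nums.length
  let prime := sieveB ((List.range n).map (fun i => decide (2 ≤ i))) 2 n
  |(List.range n).foldl
      (fun res i =>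
        res + (if prime.getD i false then -PySem.List.pyGetD nums (i : Int) 0
               else PySem.List.pyGetD nums (i : Int) 0)) 0|

-- ===== PRECONDITION & SPEC =====
def Spec_splitArray (nums : List Int) (out : Int) : Prop := out = splitArray_alt nums
instance (nums : List Int) (out : Int) : Decidable (Spec_splitArray nums out) := by unfold Spec_splitArray; infer_instance

-- ===== CLAIM (what is proved, stated in full; the proofs are below) =====
def Claim_equal_splitArray : Prop := ∀ (nums : List Int), Dom_splitArray nums → Spec_splitArray nums (splitArray nums)

-- ===== LEMMAS AND PROOFS =====

-- after marking multiples of p starting at m, index k reads false exactly on the progression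
theorem set_getD_self (l : List Bool) (m : Nat) : (l.set m false).getD m false = false := by
  rw [List.getD_eq_getElem?_getD, List.getElem?_set_self']
  cases l[m]? <;> simp

theorem markB_getD (flags : List Bool) (m n p k : Nat) (hp : 0 < p) :
    (markB flags m n p).getD k false =
      if m ≤ k ∧ k < n ∧ p ∣ (k - m) then false else flags.getD k false := by
  fun_induction markB flags m n p with
  | case1 flags m h ih =>
    rw [ih]
    by_cases hkm : k = m
    · subst hkm
      have : (k ≤ k ∧ k < n ∧ p ∣ (k - k)) := ⟨le_refl _, h.1, by simp⟩
      rw [if_pos this, if_neg (by omega), set_getD_self]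
    · have hset : (flags.set m false).getD k false = flags.getD k false := by
        rw [List.getD_eq_getElem?_getD, List.getElem?_set_ne (by omega), ← List.getD_eq_getElem?_getD]
      rw [hset]
      congr 1
      simp only [eq_iff_iff]
      constructor
      · rintro ⟨h1, h2, h3⟩
        refine ⟨by omega, h2, ?_⟩
        have hkm' : k - m = (k - (m + p)) + p := by omega
        rw [hkm']
        exact Nat.dvd_add h3 (dvd_refl p)
      · rintro ⟨h1, h2, h3⟩
        have hd := Nat.le_of_dvd (by omega) h3
        refine ⟨by omega, h2, ?_⟩
        have hkm' : k - m = (k - (m + p)) + p := by omega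
        rw [hkm'] at h3
        exact Nat.dvd_add_self_right.mp h3
  | case2 flags m h =>
    rw [if_neg (by omega)]

-- after sieving from p0, index k (< n) reads false iff it started false or has a divisor p ≥ p0 with p*p ≤ k
theorem sieveB_getD (flags : List Bool) (p0 n k : Nat) (hk : k < n) (hp0 : 0 < p0) :
    (sieveB flags p0 n).getD k false =
      (flags.getD k false && !decide (∃ p ∈ Finset.Icc p0 k, p * p ≤ k ∧ p ∣ k)) := by
  fun_induction sieveB flags p0 n with
  | case1 flags p0 h ih =>
    rw [ih (by omega), markB_getD _ _ _ _ _ hp0]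
    by_cases hC : p0 * p0 ≤ k ∧ p0 ∣ k
    · have hcond : p0 * p0 ≤ k ∧ k < n ∧ p0 ∣ k - p0 * p0 :=
        ⟨hC.1, hk, Nat.dvd_sub hC.2 (dvd_mul_right p0 p0)⟩
      rw [if_pos hcond]
      have hp0k : p0 ≤ k := le_trans (Nat.le_mul_of_pos_left p0 hp0) hC.1
      have hex : ∃ p ∈ Finset.Icc p0 k, p * p ≤ k ∧ p ∣ k :=
        ⟨p0, Finset.mem_Icc.mpr ⟨le_refl _, hp0k⟩, hC.1, hC.2⟩
      rw [decide_eq_true hex]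
      simp
    · have hcond : ¬(p0 * p0 ≤ k ∧ k < n ∧ p0 ∣ k - p0 * p0) := by
        rintro ⟨h1, _, h3⟩
        refine hC ⟨h1, ?_⟩
        have hk' : k = (k - p0 * p0) + p0 * p0 := by omega
        rw [hk']
        exact Nat.dvd_add h3 (dvd_mul_right p0 p0)
      rw [if_neg hcond]
      have hiff : (∃ p ∈ Finset.Icc p0 k, p * p ≤ k ∧ p ∣ k) ↔
          (∃ p ∈ Finset.Icc (p0 + 1) k, p * p ≤ k ∧ p ∣ k) := by
        constructor
        · rintro ⟨p, hm, hpk, hdv⟩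
          rcases Finset.mem_Icc.mp hm with ⟨hl, hr⟩
          rcases Nat.eq_or_lt_of_le hl with he | hlt
          · exact absurd ⟨he ▸ hpk, he ▸ hdv⟩ hC
          · exact ⟨p, Finset.mem_Icc.mpr ⟨hlt, hr⟩, hpk, hdv⟩
        · rintro ⟨p, hm, hx⟩
          rcases Finset.mem_Icc.mp hm with ⟨hl, hr⟩
          exact ⟨p, Finset.mem_Icc.mpr ⟨by omega, hr⟩, hx⟩
      simp only [hiff]
  | case2 flags p0 h =>
    have : ¬ ∃ p ∈ Finset.Icc p0 k, p * p ≤ k ∧ p ∣ k := by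
      rintro ⟨p, hmem, hpk, _⟩
      have hp0p : p0 ≤ p := (Finset.mem_Icc.mp hmem).1
      have : p0 * p0 ≤ p * p := Nat.mul_le_mul hp0p hp0p
      omega
    rw [decide_eq_false this]
    simp

-- the sieve's flag at k agrees with A's trial-division test
theorem sieve_eq_isPrimeA (n k : Nat) (hk : k < n) :
    (sieveB ((List.range n).map (fun i => decide (2 ≤ i))) 2 n).getD k false = isPrimeA k := by
  rw [sieveB_getD _ _ _ _ hk (by omega)]
  have hinit : ((List.range n).map (fun i => decide (2 ≤ i))).getD k false = decide (2 ≤ k) := by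
    rw [List.getD_eq_getElem?_getD]
    simp [hk]
  rw [hinit]
  unfold isPrimeA
  by_cases h2 : k ≤ 1
  · rw [if_pos h2, decide_eq_false (by omega : ¬ 2 ≤ k)]
    simp
  · rw [if_neg h2, decide_eq_true (by omega : 2 ≤ k), Bool.true_and]
    have hsk : 1 ≤ Nat.sqrt k := Nat.le_sqrt.mpr (by omega)
    by_cases hE : ∃ p ∈ Finset.Icc 2 k, p * p ≤ k ∧ p ∣ k
    · rw [decide_eq_true hE]
      symm
      rcases hE with ⟨p, hm, hpk, hdv⟩
      have hps : p ≤ Nat.sqrt k := Nat.le_sqrt.mpr hpk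
      have h2p : 2 ≤ p := (Finset.mem_Icc.mp hm).1
      simp only [Bool.not_true]
      rw [List.all_eq_false]
      refine ⟨p, ?_, ?_⟩
      · rw [List.mem_range'_1]
        omega
      · have : k % p = 0 := Nat.dvd_iff_mod_eq_zero.mp hdv
        simp [this]
    · rw [decide_eq_false hE]
      symm
      simp only [Bool.not_false]
      rw [List.all_eq_true]
      intro i hi
      rw [List.mem_range'_1] at hi
      have hisq : i ≤ Nat.sqrt k := by omega
      have hiik : i * i ≤ k := Nat.le_sqrt.mp hisq
      have hik : i ≤ k := le_trans hisq (Nat.sqrt_le_self k)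
      refine decide_eq_true ?_
      intro hmod
      exact hE ⟨i, Finset.mem_Icc.mpr ⟨hi.1, hik⟩, hiik,
        Nat.dvd_of_mod_eq_zero hmod⟩

-- ===== VERDICT (by name: the statement is the Claim_ definition above) =====
theorem splitArray_spec : Claim_equal_splitArray := by
  intro nums _
  unfold Spec_splitArray splitArray splitArray_alt
  congr 1
  apply PySem.List.foldl_congr_mem
  intro acc i hi
  rw [List.mem_range] at hi
  rw [← sieve_eq_isPrimeA nums.length i hi]
  by_cases hp : (sieveB ((List.range nums.length).map (fun i => decide (2 ≤ i))) 2 nums.length).getD i false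
  · rw [if_pos hp, if_pos hp, sub_eq_add_neg]
  · rw [if_neg hp, if_neg hp]
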